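-- pv_equiv track=rewrite | github.com/hydropix/TranslateBookWithLLM | src/core/epub/text_splitter.py | _find_word_boundary_near
-- ===== SOURCE A (Python) =====
-- def _find_word_boundary_near(text: str, pos: int) -> int:
--     """
--     Find a word boundary (space) near the given position.
--     Looks backward first to avoid cutting words.
--
--     Args:
--         text: Text to search in
--         pos: Position to search near
--
--     Returns:
--         Position of word boundary
--     """
--     if pos >= len(text):
--         return len(text)
--
--     # Look backward for a space
--     for i in range(pos, max(0, pos - 50), -1):
--         if text[i] in ' \n\t':
--             return i + 1
--
--     # If no space found backward, look forward
--     for i in range(pos, min(len(text), pos + 50)):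
--         if text[i] in ' \n\t':
--             return i + 1
--
--     # No word boundary found, split at pos
--     return pos
-- ===== SOURCE B (Python) =====
-- # Library-search reimplementation: rfind/find over the two 50-char windows
-- # instead of A's char-by-char scanning loops.
-- _WS = ' \n\t'
--
-- def _find_word_boundary_near(text: str, pos: int) -> int:
--     n = len(text)
--     if pos >= n:
--         return n
--     lo = max(0, pos - 50) + 1
--     back = max(text.rfind(c, lo, pos + 1) for c in _WS)
--     if back != -1:
--         return back + 1
--     fwd = [j for j in (text.find(c, pos, min(n, pos + 50)) for c in _WS) if j != -1]
--     if fwd: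
--         return min(fwd) + 1
--     return pos
-- ===== Notes on version B (the rewrite author's own statement) =====
-- stated objective: idiomatic
-- what changed: Replaces A's two char-by-char scanning loops with library substring searches: backward via str.rfind per whitespace char combined with max, forward via str.find per whitespace char filtered and combined with min.
-- outside the precondition, e.g. on _find_word_boundary_near('ab cd', -1): A returns 3, B returns -1; on _find_word_boundary_near('', -1): A raises IndexError, B returns -1
import Mathlib
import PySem

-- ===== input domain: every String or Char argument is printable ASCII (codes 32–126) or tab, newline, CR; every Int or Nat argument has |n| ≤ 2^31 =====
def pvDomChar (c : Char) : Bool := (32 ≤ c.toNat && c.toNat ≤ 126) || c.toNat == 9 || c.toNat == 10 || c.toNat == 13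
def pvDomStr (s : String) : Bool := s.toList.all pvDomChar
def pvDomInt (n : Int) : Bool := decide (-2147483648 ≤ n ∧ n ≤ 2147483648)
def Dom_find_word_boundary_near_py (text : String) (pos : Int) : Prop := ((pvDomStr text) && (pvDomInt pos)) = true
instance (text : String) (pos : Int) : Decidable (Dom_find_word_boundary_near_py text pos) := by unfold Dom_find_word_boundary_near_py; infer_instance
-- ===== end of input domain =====

-- B replaces A's two char-by-char scanning loops with rfind/find window searches (idiomatic); same return value for every pos ≥ 0.

-- ===== PORT A =====
-- `c in ' \n\t'` (membership of a single char in the 3-char string)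
def pvWsA (c : Char) : Bool := c == ' ' || c == '\n' || c == '\t'

-- `for i in <idxs>: if text[i] in ' \n\t': return i + 1` — first matching index of the range, early return.
-- pyGet? = none is where Python raises IndexError (never reached inside Pre_); we return `some 0` there.
def pvScanA (l : List Char) : List Int → Option Int
  | [] => none
  | i :: rest =>
    match PySem.List.pyGet? l i with
    | none => some 0
    | some c => if pvWsA c then some (i + 1) else pvScanA l rest

def find_word_boundary_near_py (text : String) (pos : Int) : Int :=
  if pos ≥ (text.toList.length : Int) then (text.toList.length : Int)
  else
    match pvScanA text.toList (PySem.List.pyRange pos (max 0 (pos - 50)) (-1)) with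
    | some r => r
    | none =>
      match pvScanA text.toList (PySem.List.pyRange pos (min (text.toList.length : Int) (pos + 50)) 1) with
      | some r => r
      | none => pos

-- ===== PORT B =====
def find_word_boundary_near_py_alt (text : String) (pos : Int) : Int :=
  let n : Int := text.toList.length
  if pos ≥ n then n
  else
    let lo := max 0 (pos - 50) + 1
    let back := max (max (PySem.Str.rfindFrom text " " lo (some (pos + 1)))
                         (PySem.Str.rfindFrom text "\n" lo (some (pos + 1))))
                    (PySem.Str.rfindFrom text "\t" lo (some (pos + 1)))
    if back ≠ -1 then back + 1
    else
      let e := min n (pos + 50)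
      let fwd := [PySem.Str.findFrom text " " pos (some e),
                  PySem.Str.findFrom text "\n" pos (some e),
                  PySem.Str.findFrom text "\t" pos (some e)].filter (fun j => j ≠ -1)
      match PySem.List.min? fwd id with
      | some m => m + 1
      | none => pos

-- ===== PRECONDITION & SPEC =====
-- Pre_ restricts to the natural domain of text positions (pos ≥ 0): on negative pos A reads
-- characters through Python's negative-index wraparound (an accident of the loop), and raises
-- IndexError when the text is empty.
def Pre_find_word_boundary_near_py (_text : String) (pos : Int) : Prop := 0 ≤ pos
instance (text : String) (pos : Int) : Decidable (Pre_find_word_boundary_near_py text pos) := by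
  unfold Pre_find_word_boundary_near_py; infer_instance

def pvWitness_find_word_boundary_near_py : String × Int := ("ab cd", 4)

def Spec_find_word_boundary_near_py (text : String) (pos : Int) (out : Int) : Prop := out = find_word_boundary_near_py_alt text pos
instance (text : String) (pos : Int) (out : Int) : Decidable (Spec_find_word_boundary_near_py text pos out) := by unfold Spec_find_word_boundary_near_py; infer_instance

-- ===== CLAIM (what is proved, stated in full; the proofs are below) =====
def Claim_equal_find_word_boundary_near_py : Prop := ∀ (text : String) (pos : Int), Dom_find_word_boundary_near_py text pos → Pre_find_word_boundary_near_py text pos → Spec_find_word_boundary_near_py text pos (find_word_boundary_near_py text pos)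

-- ===== LEMMAS AND PROOFS =====

lemma pvWsA_eq_true_iff (c : Char) : pvWsA c = true ↔ c = ' ' ∨ c = '\n' ∨ c = '\t' := by
  simp [pvWsA, or_assoc]

-- "no whitespace char at any index of [a, b)"
def pvNoWs (l : List Char) (a b : Nat) : Prop :=
  ∀ j, a ≤ j → j < b → pvWsA (l.getD j ' ') = false

-- "k is the greatest whitespace index of [a, b)"
def pvGW (l : List Char) (a b k : Nat) : Prop :=
  a ≤ k ∧ k < b ∧ pvWsA (l.getD k ' ') = true ∧
    ∀ j, a ≤ j → j < b → pvWsA (l.getD j ' ') = true → j ≤ k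

-- "k is the least whitespace index of [a, b)"
def pvLW (l : List Char) (a b k : Nat) : Prop :=
  a ≤ k ∧ k < b ∧ pvWsA (l.getD k ' ') = true ∧
    ∀ j, a ≤ j → j < b → pvWsA (l.getD j ' ') = true → k ≤ j

lemma pvGW_unique {l : List Char} {a b k k' : Nat} (h : pvGW l a b k) (h' : pvGW l a b k') : k = k' := by
  obtain ⟨h1, h2, h3, h4⟩ := h; obtain ⟨g1, g2, g3, g4⟩ := h'
  have := h4 k' g1 g2 g3; have := g4 k h1 h2 h3; omega

lemma pvLW_unique {l : List Char} {a b k k' : Nat} (h : pvLW l a b k) (h' : pvLW l a b k') : k = k' := by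
  obtain ⟨h1, h2, h3, h4⟩ := h; obtain ⟨g1, g2, g3, g4⟩ := h'
  have := h4 k' g1 g2 g3; have := g4 k h1 h2 h3; omega

lemma pvGW_not_noWs {l : List Char} {a b k : Nat} (h : pvGW l a b k) (hn : pvNoWs l a b) : False := by
  obtain ⟨h1, h2, h3, _⟩ := h; have := hn k h1 h2; rw [this] at h3; cases h3

lemma pvLW_not_noWs {l : List Char} {a b k : Nat} (h : pvLW l a b k) (hn : pvNoWs l a b) : False := by
  obtain ⟨h1, h2, h3, _⟩ := h; have := hn k h1 h2; rw [this] at h3; cases h3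

-- per-char spec of the backward window search value (rfind over [a, b))
def pvCSback (l : List Char) (a b : Nat) (c : Char) (v : Int) : Prop :=
  (v = -1 ∧ ∀ j, a ≤ j → j < b → l.getD j ' ' ≠ c)
  ∨ ∃ k, a ≤ k ∧ k < b ∧ l.getD k ' ' = c ∧ v = (k : Int) ∧
      ∀ j, a ≤ j → j < b → l.getD j ' ' = c → j ≤ k

-- per-char spec of the forward window search value (find over [a, b))
def pvCSfwd (l : List Char) (a b : Nat) (c : Char) (v : Int) : Prop :=
  (v = -1 ∧ ∀ j, a ≤ j → j < b → l.getD j ' ' ≠ c)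
  ∨ ∃ k, a ≤ k ∧ k < b ∧ l.getD k ' ' = c ∧ v = (k : Int) ∧
      ∀ j, a ≤ j → j < b → l.getD j ' ' = c → k ≤ j


lemma pvPrefix_singleton (c : Char) (s : List Char) (j : Nat) :
    [c] <+: s.drop j ↔ j < s.length ∧ s.getD j ' ' = c := by
  by_cases h : j < s.length
  · rw [List.drop_eq_getElem_cons h, List.cons_prefix_cons]
    simp [List.getD_eq_getElem?_getD, h, eq_comm]
  · rw [List.drop_eq_nil_of_le (by omega)]
    simp [h]

lemma pvRfind_go (s : List Char) (c : Char) : ∀ (m : Nat),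
    (PySem.Chars.rfind.go s [c] m = -1 ∧ ∀ j, j ≤ m → ¬([c] <+: s.drop j))
    ∨ ∃ k, k ≤ m ∧ ([c] <+: s.drop k) ∧ PySem.Chars.rfind.go s [c] m = (k : Int) ∧
        ∀ j, j ≤ m → ([c] <+: s.drop j) → j ≤ k := by
  intro m
  induction m with
  | zero =>
    by_cases h : [c].isPrefixOf s
    · right; exact ⟨0, le_refl 0, by simpa [List.isPrefixOf_iff_prefix] using h,
        by simp [PySem.Chars.rfind.go, h], fun j hj _ => hj⟩
    · left
      refine ⟨by simp [PySem.Chars.rfind.go, h], ?_⟩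
      intro j hj hp
      interval_cases j
      exact h (by simpa [List.isPrefixOf_iff_prefix] using hp)
  | succ m ih =>
    by_cases h : [c].isPrefixOf (s.drop (m+1))
    · right
      exact ⟨m+1, le_refl _, by simpa [List.isPrefixOf_iff_prefix] using h,
        by simp [PySem.Chars.rfind.go, h], fun j hj _ => hj⟩
    · have hgo : PySem.Chars.rfind.go s [c] (m+1) = PySem.Chars.rfind.go s [c] m := by
        simp [PySem.Chars.rfind.go, h]
      rcases ih with ⟨h1, h2⟩ | ⟨k, hk1, hk2, hk3, hk4⟩
      · left
        refine ⟨hgo.trans h1, ?_⟩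
        intro j hj hp
        rcases Nat.lt_or_ge j (m+1) with hj' | hj'
        · exact h2 j (by omega) hp
        · have : j = m+1 := by omega
          subst this; exact h (by simpa [List.isPrefixOf_iff_prefix] using hp)
      · right
        refine ⟨k, by omega, hk2, hgo.trans hk3, ?_⟩
        intro j hj hp
        rcases Nat.lt_or_ge j (m+1) with hj' | hj'
        · exact hk4 j (by omega) hp
        · have : j = m+1 := by omega
          subst this; exact absurd (by simpa [List.isPrefixOf_iff_prefix] using hp) h

lemma pvRfind_singleton (s : List Char) (c : Char) :
    (PySem.Chars.rfind s [c] = -1 ∧ ∀ j, j < s.length → s.getD j ' ' ≠ c)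
    ∨ ∃ k, k < s.length ∧ s.getD k ' ' = c ∧ PySem.Chars.rfind s [c] = (k : Int) ∧
        ∀ j, j < s.length → s.getD j ' ' = c → j ≤ k := by
  have h := pvRfind_go s c s.length
  rcases h with ⟨h1, h2⟩ | ⟨k, hk1, hk2, hk3, hk4⟩
  · left
    refine ⟨h1, fun j hj hc => h2 j (by omega) ?_⟩
    exact (pvPrefix_singleton c s j).2 ⟨hj, hc⟩
  · right
    obtain ⟨hkl, hkc⟩ := (pvPrefix_singleton c s k).1 hk2
    exact ⟨k, hkl, hkc, hk3, fun j hj hc => hk4 j (by omega) ((pvPrefix_singleton c s j).2 ⟨hj, hc⟩)⟩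

lemma pvFind_singleton (s : List Char) (c : Char) :
    (PySem.Chars.find s [c] = -1 ∧ ∀ j, j < s.length → s.getD j ' ' ≠ c)
    ∨ ∃ k, k < s.length ∧ s.getD k ' ' = c ∧ PySem.Chars.find s [c] = (k : Int) ∧
        ∀ j, j < s.length → s.getD j ' ' = c → k ≤ j := by
  by_cases h : PySem.Chars.find s [c] = -1
  · left
    refine ⟨h, fun j hj hc => ?_⟩
    have hni := (PySem.Chars.find_eq_neg_one_iff s [c]).1 h
    have : ∃ i, [c] <+: s.drop i := ⟨j, (pvPrefix_singleton c s j).2 ⟨hj, hc⟩⟩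
    rw [PySem.Chars.exists_prefix_drop_iff_isIn, PySem.Chars.isIn_iff_infix] at this
    exact hni this
  · right
    have hge : 0 ≤ PySem.Chars.find s [c] := by
      have := PySem.Chars.neg_one_le_find s [c]; omega
    obtain ⟨hp, hmin⟩ := PySem.Chars.find_spec hge
    set k := (PySem.Chars.find s [c]).toNat with hk
    obtain ⟨hkl, hkc⟩ := (pvPrefix_singleton c s k).1 hp
    refine ⟨k, hkl, hkc, by omega, fun j hj hc => ?_⟩
    by_contra hlt
    exact hmin j (by omega) ((pvPrefix_singleton c s j).2 ⟨hj, hc⟩)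

lemma pvScanA_cons_some (l : List Char) (i : Int) (rest : List Int) (c : Char)
    (h : PySem.List.pyGet? l i = some c) :
    pvScanA l (i :: rest) = if pvWsA c then some (i + 1) else pvScanA l rest := by
  simp [pvScanA, h]

lemma pvScanA_desc (l : List Char) (q : Nat) : ∀ (cnt : Nat), q + cnt < l.length →
    (pvScanA l (PySem.List.pyRange ((q + cnt : Nat) : Int) (q : Int) (-1)) = none ∧ pvNoWs l (q+1) (q+cnt+1))
    ∨ ∃ k, pvGW l (q+1) (q+cnt+1) k ∧
        pvScanA l (PySem.List.pyRange ((q + cnt : Nat) : Int) (q : Int) (-1)) = some ((k : Int) + 1) := by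
  intro cnt
  induction cnt with
  | zero =>
    intro _
    rw [PySem.List.pyRange_neg_one_eq_nil (by simp)]
    exact Or.inl ⟨rfl, fun j h1 h2 => absurd h1 (by omega)⟩
  | succ m ih =>
    intro hlen
    have hcons : PySem.List.pyRange ((q + (m+1) : Nat) : Int) (q : Int) (-1)
        = ((q + (m+1) : Nat) : Int) :: PySem.List.pyRange ((q + m : Nat) : Int) (q : Int) (-1) := by
      have e1 : ((q + (m+1) : Nat) : Int) - 1 = ((q + m : Nat) : Int) := by push_cast; ring
      rw [PySem.List.pyRange_neg_one_cons (by push_cast; omega), e1]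
    rw [hcons]
    have hidx : q + (m+1) < l.length := hlen
    have hget : PySem.List.pyGet? l ((q + (m+1) : Nat) : Int) = some (l.getD (q + (m+1)) ' ') := by
      rw [PySem.List.pyGet?_natCast]
      simp [List.getD_eq_getElem?_getD, List.getElem?_eq_getElem hidx]
    by_cases hws : pvWsA (l.getD (q + (m+1)) ' ') = true
    · right
      refine ⟨q + (m+1), ⟨by omega, by omega, hws, fun j _ h2 _ => by omega⟩, ?_⟩
      rw [pvScanA_cons_some l _ _ _ hget, if_pos hws]
    · have hrest : pvScanA l (((q + (m+1) : Nat) : Int) :: PySem.List.pyRange ((q + m : Nat) : Int) (q : Int) (-1))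
          = pvScanA l (PySem.List.pyRange ((q + m : Nat) : Int) (q : Int) (-1)) := by
        rw [pvScanA_cons_some l _ _ _ hget, if_neg hws]
      rw [hrest]
      rcases ih (by omega) with ⟨h1, h2⟩ | ⟨k, hk, hs⟩
      · left
        refine ⟨h1, fun j hj1 hj2 => ?_⟩
        rcases Nat.lt_or_ge j (q+m+1) with h | h
        · exact h2 j hj1 h
        · have : j = q + (m+1) := by omega
          subst this; simpa using hws
      · right
        obtain ⟨hk1, hk2, hk3, hk4⟩ := hk
        refine ⟨k, ⟨hk1, by omega, hk3, fun j hj1 hj2 hwj => ?_⟩, hs⟩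
        rcases Nat.lt_or_ge j (q+m+1) with h | h
        · exact hk4 j hj1 h hwj
        · have : j = q + (m+1) := by omega
          subst this; exact absurd hwj hws

lemma pvScanA_asc (l : List Char) : ∀ (cnt : Nat) (q : Nat), q + cnt ≤ l.length →
    (pvScanA l (PySem.List.pyRange (q : Int) ((q + cnt : Nat) : Int) 1) = none ∧ pvNoWs l q (q+cnt))
    ∨ ∃ k, pvLW l q (q+cnt) k ∧
        pvScanA l (PySem.List.pyRange (q : Int) ((q + cnt : Nat) : Int) 1) = some ((k : Int) + 1) := by
  intro cnt
  induction cnt with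
  | zero =>
    intro q _
    rw [PySem.List.pyRange_one_eq_nil (by simp)]
    exact Or.inl ⟨rfl, fun j h1 h2 => absurd h1 (by omega)⟩
  | succ m ih =>
    intro q hlen
    have hcons : PySem.List.pyRange (q : Int) ((q + (m+1) : Nat) : Int) 1
        = (q : Int) :: PySem.List.pyRange ((q+1 : Nat) : Int) (((q+1) + m : Nat) : Int) 1 := by
      have e1 : ((q : Nat) : Int) + 1 = ((q + 1 : Nat) : Int) := by push_cast; ring
      have e2 : ((q + (m+1) : Nat) : Int) = (((q+1) + m : Nat) : Int) := by push_cast; ring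
      rw [PySem.List.pyRange_one_cons (by push_cast; omega), e1, e2]
    rw [hcons]
    have hidx : q < l.length := by omega
    have hget : PySem.List.pyGet? l ((q : Nat) : Int) = some (l.getD q ' ') := by
      rw [PySem.List.pyGet?_natCast]
      simp [List.getD_eq_getElem?_getD, List.getElem?_eq_getElem hidx]
    by_cases hws : pvWsA (l.getD q ' ') = true
    · right
      refine ⟨q, ⟨by omega, by omega, hws, fun j h1 _ _ => h1⟩, ?_⟩
      rw [pvScanA_cons_some l _ _ _ hget, if_pos hws]
    · have hrest : pvScanA l (((q : Nat) : Int) :: PySem.List.pyRange ((q+1 : Nat) : Int) (((q+1) + m : Nat) : Int) 1)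
          = pvScanA l (PySem.List.pyRange ((q+1 : Nat) : Int) (((q+1) + m : Nat) : Int) 1) := by
        rw [pvScanA_cons_some l _ _ _ hget, if_neg hws]
      rw [hrest]
      rcases ih (q+1) (by omega) with ⟨h1, h2⟩ | ⟨k, hk, hs⟩
      · left
        refine ⟨h1, fun j hj1 hj2 => ?_⟩
        rcases Nat.lt_or_ge j (q+1) with h | h
        · have : j = q := by omega
          subst this; simpa using hws
        · exact h2 j h (by omega)
      · right
        obtain ⟨hk1, hk2, hk3, hk4⟩ := hk
        refine ⟨k, ⟨by omega, by omega, hk3, fun j hj1 hj2 hwj => ?_⟩, hs⟩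
        rcases Nat.lt_or_ge j (q+1) with h | h
        · have : j = q := by omega
          subst this; exact absurd hwj hws
        · exact hk4 j h (by omega) hwj

lemma pvWindow_length (l : List Char) (a b : Nat) (hb : b ≤ l.length) :
    ((l.take b).drop a).length = b - a := by
  simp [List.length_drop, List.length_take]; omega

lemma pvWindow_getD (l : List Char) (a b k : Nat) (h1 : a + k < b) (_h2 : a + k < l.length) :
    ((l.take b).drop a).getD k ' ' = l.getD (a + k) ' ' := by
  simp [List.getD_eq_getElem?_getD, List.getElem?_drop, h1]

lemma pvRfindFrom_spec (l : List Char) (c : Char) (a b : Nat) (hb : b ≤ l.length) (hab : a ≤ b) :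
    pvCSback l a b c (PySem.Chars.rfindFrom l [c] (a : Int) (some (b : Int))) := by
  have heval : PySem.Chars.rfindFrom l [c] (a : Int) (some (b : Int))
      = (if PySem.Chars.rfind ((l.take b).drop a) [c] = -1 then -1
         else (a : Int) + PySem.Chars.rfind ((l.take b).drop a) [c]) := by
    have h1 : ¬((l.length : Int) < (b : Int)) := by omega
    have h2 : ¬((b : Int) < 0) := by omega
    have h3 : ¬((a : Int) < 0) := by omega
    have h4 : ¬((b : Int) < (a : Int)) := by omega
    simp only [PySem.Chars.rfindFrom, h1, h2, h3, h4, if_false, Int.toNat_natCast]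
  rw [heval]
  have hw := pvRfind_singleton ((l.take b).drop a) c
  rw [pvWindow_length l a b hb] at hw
  rcases hw with ⟨h1, h2⟩ | ⟨k, hk1, hk2, hk3, hk4⟩
  · left
    refine ⟨by rw [if_pos h1], fun j hj1 hj2 hc => ?_⟩
    have := h2 (j - a) (by omega)
    rw [pvWindow_getD l a b (j - a) (by omega) (by omega)] at this
    exact this (by rwa [Nat.add_sub_cancel' hj1])
  · right
    rw [pvWindow_getD l a b k (by omega) (by omega)] at hk2
    refine ⟨a + k, by omega, by omega, hk2, ?_, fun j hj1 hj2 hc => ?_⟩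
    · rw [if_neg (by omega), hk3]; push_cast; ring
    · have := hk4 (j - a) (by omega)
      rw [pvWindow_getD l a b (j - a) (by omega) (by omega)] at this
      have := this (by rwa [Nat.add_sub_cancel' hj1])
      omega

lemma pvFindFrom_spec (l : List Char) (c : Char) (a b : Nat) (hb : b ≤ l.length) (hab : a ≤ b) :
    pvCSfwd l a b c (PySem.Chars.findFrom l [c] (a : Int) (some (b : Int))) := by
  have heval : PySem.Chars.findFrom l [c] (a : Int) (some (b : Int))
      = (if PySem.Chars.find ((l.take b).drop a) [c] = -1 then -1
         else (a : Int) + PySem.Chars.find ((l.take b).drop a) [c]) := by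
    have h1 : ¬((l.length : Int) < (b : Int)) := by omega
    have h2 : ¬((b : Int) < 0) := by omega
    have h3 : ¬((a : Int) < 0) := by omega
    have h4 : ¬((b : Int) < (a : Int)) := by omega
    simp only [PySem.Chars.findFrom, h1, h2, h3, h4, if_false, Int.toNat_natCast]
  rw [heval]
  have hw := pvFind_singleton ((l.take b).drop a) c
  rw [pvWindow_length l a b hb] at hw
  rcases hw with ⟨h1, h2⟩ | ⟨k, hk1, hk2, hk3, hk4⟩
  · left
    refine ⟨by rw [if_pos h1], fun j hj1 hj2 hc => ?_⟩
    have := h2 (j - a) (by omega)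
    rw [pvWindow_getD l a b (j - a) (by omega) (by omega)] at this
    exact this (by rwa [Nat.add_sub_cancel' hj1])
  · right
    rw [pvWindow_getD l a b k (by omega) (by omega)] at hk2
    refine ⟨a + k, by omega, by omega, hk2, ?_, fun j hj1 hj2 hc => ?_⟩
    · rw [if_neg (by omega), hk3]; push_cast; ring
    · have := hk4 (j - a) (by omega)
      rw [pvWindow_getD l a b (j - a) (by omega) (by omega)] at this
      have := this (by rwa [Nat.add_sub_cancel' hj1])
      omega

lemma pvBackUb {l : List Char} {a b : Nat} {v1 v2 v3 : Int}
    (h1 : pvCSback l a b ' ' v1) (h2 : pvCSback l a b '\n' v2) (h3 : pvCSback l a b '\t' v3)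
    {M : Int} (hM1 : v1 ≤ M) (hM2 : v2 ≤ M) (hM3 : v3 ≤ M) :
    ∀ j, a ≤ j → j < b → pvWsA (l.getD j ' ') = true → (j : Int) ≤ M := by
  intro j hj1 hj2 hwj
  rw [pvWsA_eq_true_iff] at hwj
  rcases hwj with hc | hc | hc
  · rcases h1 with ⟨_, hno⟩ | ⟨k, _, _, _, hv, hmax⟩
    · exact absurd hc (hno j hj1 hj2)
    · have := hmax j hj1 hj2 hc; omega
  · rcases h2 with ⟨_, hno⟩ | ⟨k, _, _, _, hv, hmax⟩
    · exact absurd hc (hno j hj1 hj2)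
    · have := hmax j hj1 hj2 hc; omega
  · rcases h3 with ⟨_, hno⟩ | ⟨k, _, _, _, hv, hmax⟩
    · exact absurd hc (hno j hj1 hj2)
    · have := hmax j hj1 hj2 hc; omega

lemma pvMaxCombine (l : List Char) (a b : Nat) (v1 v2 v3 : Int)
    (h1 : pvCSback l a b ' ' v1) (h2 : pvCSback l a b '\n' v2) (h3 : pvCSback l a b '\t' v3) :
    (max (max v1 v2) v3 = -1 ∧ pvNoWs l a b)
    ∨ ∃ k, pvGW l a b k ∧ max (max v1 v2) v3 = (k : Int) := by
  set m := max (max v1 v2) v3 with hm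
  have hub1 : v1 ≤ m := by simp [hm]
  have hub2 : v2 ≤ m := by simp [hm]
  have hub3 : v3 ≤ m := by simp [hm]
  by_cases h0 : m = -1
  · left
    refine ⟨h0, fun j hj1 hj2 => ?_⟩
    by_contra hws
    have hws' : pvWsA (l.getD j ' ') = true := by
      cases hq : pvWsA (l.getD j ' ') with
      | true => rfl
      | false => exact absurd hq hws
    have := pvBackUb h1 h2 h3 hub1 hub2 hub3 j hj1 hj2 hws'
    omega
  · right
    have hch : m = v1 ∨ m = v2 ∨ m = v3 := by
      rcases max_choice (max v1 v2) v3 with h | h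
      · rcases max_choice v1 v2 with h' | h'
        · left; rw [hm, h, h']
        · right; left; rw [hm, h, h']
      · right; right; rw [hm, h]
    have key : ∃ k : Nat, a ≤ k ∧ k < b ∧ pvWsA (l.getD k ' ') = true ∧ m = (k : Int) := by
      rcases hch with he | he | he
      · rcases h1 with ⟨hv, _⟩ | ⟨k, hk1, hk2, hk3, hv, _⟩
        · exact absurd (he.trans hv) h0
        · exact ⟨k, hk1, hk2, by rw [pvWsA_eq_true_iff]; exact Or.inl hk3, he.trans hv⟩
      · rcases h2 with ⟨hv, _⟩ | ⟨k, hk1, hk2, hk3, hv, _⟩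
        · exact absurd (he.trans hv) h0
        · exact ⟨k, hk1, hk2, by rw [pvWsA_eq_true_iff]; exact Or.inr (Or.inl hk3), he.trans hv⟩
      · rcases h3 with ⟨hv, _⟩ | ⟨k, hk1, hk2, hk3, hv, _⟩
        · exact absurd (he.trans hv) h0
        · exact ⟨k, hk1, hk2, by rw [pvWsA_eq_true_iff]; exact Or.inr (Or.inr hk3), he.trans hv⟩
    obtain ⟨k, hk1, hk2, hk3, hk4⟩ := key
    refine ⟨k, ⟨hk1, hk2, hk3, fun j hj1 hj2 hwj => ?_⟩, hk4⟩
    have := pvBackUb h1 h2 h3 hub1 hub2 hub3 j hj1 hj2 hwj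
    omega

lemma pvMin?_step (acc y : Int) (t : List Int) :
    PySem.List.min? (acc :: y :: t) id = PySem.List.min? ((if y < acc then y else acc) :: t) id := by
  simp only [PySem.List.min?, List.foldl, id_eq]
  split <;> rfl

lemma pvMin?_spec (xs : List Int) :
    (PySem.List.min? xs id = none ∧ xs = []) ∨
    ∃ m, PySem.List.min? xs id = some m ∧ m ∈ xs ∧ ∀ x ∈ xs, m ≤ x := by
  have gen : ∀ (ys : List Int) (acc : Int),
      ∃ m, PySem.List.min? (acc :: ys) id = some m ∧
        (m = acc ∨ m ∈ ys) ∧ m ≤ acc ∧ ∀ x ∈ ys, m ≤ x := by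
    intro ys
    induction ys with
    | nil => intro acc; exact ⟨acc, by simp [PySem.List.min?], Or.inl rfl, le_refl _, by simp⟩
    | cons y t ih =>
      intro acc
      by_cases h : y < acc
      · obtain ⟨m, hm1, hm2, hm3, hm4⟩ := ih y
        refine ⟨m, ?_, ?_, by omega, ?_⟩
        · rw [pvMin?_step, if_pos h]; exact hm1
        · rcases hm2 with h' | h'
          · exact Or.inr (by simp [h'])
          · exact Or.inr (by simp [h'])
        · intro x hx
          rcases List.mem_cons.1 hx with h' | h'
          · subst h'; omega
          · exact hm4 x h'
      · obtain ⟨m, hm1, hm2, hm3, hm4⟩ := ih acc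
        refine ⟨m, ?_, ?_, hm3, ?_⟩
        · rw [pvMin?_step, if_neg h]; exact hm1
        · rcases hm2 with h' | h'
          · exact Or.inl h'
          · exact Or.inr (by simp [h'])
        · intro x hx
          rcases List.mem_cons.1 hx with h' | h'
          · subst h'; omega
          · exact hm4 x h'
  cases xs with
  | nil => exact Or.inl ⟨rfl, rfl⟩
  | cons x t =>
    right
    obtain ⟨m, hm1, hm2, hm3, hm4⟩ := gen t x
    refine ⟨m, hm1, ?_, ?_⟩
    · rcases hm2 with h | h
      · simp [h]
      · simp [h]
    · intro z hz
      rcases List.mem_cons.1 hz with h | h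
      · subst h; exact hm3
      · exact hm4 z h

lemma pvMinCombine (l : List Char) (a b : Nat) (v1 v2 v3 : Int)
    (h1 : pvCSfwd l a b ' ' v1) (h2 : pvCSfwd l a b '\n' v2) (h3 : pvCSfwd l a b '\t' v3) :
    (PySem.List.min? ([v1, v2, v3].filter (fun j => j ≠ -1)) id = none ∧ pvNoWs l a b)
    ∨ ∃ k, pvLW l a b k ∧ PySem.List.min? ([v1, v2, v3].filter (fun j => j ≠ -1)) id = some (k : Int) := by
  set F := [v1, v2, v3].filter (fun j => j ≠ -1) with hF
  have hmemF : ∀ x : Int, x ∈ F ↔ (x = v1 ∨ x = v2 ∨ x = v3) ∧ x ≠ -1 := by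
    intro x; simp [hF]
  rcases pvMin?_spec F with ⟨hn, hFe⟩ | ⟨m, hm1, hm2, hm3⟩
  · left
    have e1 : v1 = -1 := by
      by_contra h; have : v1 ∈ F := (hmemF v1).2 ⟨Or.inl rfl, h⟩; rw [hFe] at this; simp at this
    have e2 : v2 = -1 := by
      by_contra h; have : v2 ∈ F := (hmemF v2).2 ⟨Or.inr (Or.inl rfl), h⟩; rw [hFe] at this; simp at this
    have e3 : v3 = -1 := by
      by_contra h; have : v3 ∈ F := (hmemF v3).2 ⟨Or.inr (Or.inr rfl), h⟩; rw [hFe] at this; simp at this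
    refine ⟨hn, fun j hj1 hj2 => ?_⟩
    cases hq : pvWsA (l.getD j ' ') with
    | false => rfl
    | true =>
      exfalso
      rw [pvWsA_eq_true_iff] at hq
      rcases hq with hc | hc | hc
      · rcases h1 with ⟨_, hno⟩ | ⟨k, _, _, _, hv, _⟩
        · exact (hno j hj1 hj2) hc
        · rw [e1] at hv; omega
      · rcases h2 with ⟨_, hno⟩ | ⟨k, _, _, _, hv, _⟩
        · exact (hno j hj1 hj2) hc
        · rw [e2] at hv; omega
      · rcases h3 with ⟨_, hno⟩ | ⟨k, _, _, _, hv, _⟩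
        · exact (hno j hj1 hj2) hc
        · rw [e3] at hv; omega
  · right
    obtain ⟨hor, hne⟩ := (hmemF m).1 hm2
    have key : ∃ k : Nat, a ≤ k ∧ k < b ∧ pvWsA (l.getD k ' ') = true ∧ m = (k : Int) := by
      rcases hor with he | he | he
      · rcases h1 with ⟨hv, _⟩ | ⟨k, hk1, hk2, hk3, hv, _⟩
        · exact absurd (he.trans hv) hne
        · exact ⟨k, hk1, hk2, by rw [pvWsA_eq_true_iff]; exact Or.inl hk3, he.trans hv⟩
      · rcases h2 with ⟨hv, _⟩ | ⟨k, hk1, hk2, hk3, hv, _⟩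
        · exact absurd (he.trans hv) hne
        · exact ⟨k, hk1, hk2, by rw [pvWsA_eq_true_iff]; exact Or.inr (Or.inl hk3), he.trans hv⟩
      · rcases h3 with ⟨hv, _⟩ | ⟨k, hk1, hk2, hk3, hv, _⟩
        · exact absurd (he.trans hv) hne
        · exact ⟨k, hk1, hk2, by rw [pvWsA_eq_true_iff]; exact Or.inr (Or.inr hk3), he.trans hv⟩
    obtain ⟨k, hk1, hk2, hk3, hk4⟩ := key
    refine ⟨k, ⟨hk1, hk2, hk3, fun j hj1 hj2 hwj => ?_⟩, by rw [← hk4]; exact hm1⟩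
    rw [pvWsA_eq_true_iff] at hwj
    rcases hwj with hc | hc | hc
    · rcases h1 with ⟨_, hno⟩ | ⟨k', _, _, _, hv', hmin'⟩
      · exact absurd hc (hno j hj1 hj2)
      · have hj' := hmin' j hj1 hj2 hc
        have hvF : v1 ∈ F := (hmemF v1).2 ⟨Or.inl rfl, by omega⟩
        have := hm3 v1 hvF; omega
    · rcases h2 with ⟨_, hno⟩ | ⟨k', _, _, _, hv', hmin'⟩
      · exact absurd hc (hno j hj1 hj2)
      · have hj' := hmin' j hj1 hj2 hc
        have hvF : v2 ∈ F := (hmemF v2).2 ⟨Or.inr (Or.inl rfl), by omega⟩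
        have := hm3 v2 hvF; omega
    · rcases h3 with ⟨_, hno⟩ | ⟨k', _, _, _, hv', hmin'⟩
      · exact absurd hc (hno j hj1 hj2)
      · have hj' := hmin' j hj1 hj2 hc
        have hvF : v3 ∈ F := (hmemF v3).2 ⟨Or.inr (Or.inr rfl), by omega⟩
        have := hm3 v3 hvF; omega


-- ===== VERDICT (by name: the statement is the Claim_ definition above) =====
theorem find_word_boundary_near_py_spec : Claim_equal_find_word_boundary_near_py := by
  intro text pos hDom hPre
  unfold Spec_find_word_boundary_near_py
  unfold Pre_find_word_boundary_near_py at hPre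
  obtain ⟨p, rfl⟩ := Int.eq_ofNat_of_zero_le hPre
  by_cases hn : ((p : Nat) : Int) ≥ (text.toList.length : Int)
  · simp only [find_word_boundary_near_py, find_word_boundary_near_py_alt, if_pos hn]
  · simp only [find_word_boundary_near_py, find_word_boundary_near_py_alt, if_neg hn]
    have hpn : p < text.toList.length := by omega
    -- backward window [q+1, p+1)
    set l := text.toList with hl
    set q : Nat := (max 0 ((p : Int) - 50)).toNat with hqdef
    have hq0 : ((q : Nat) : Int) = max 0 ((p : Int) - 50) := Int.toNat_of_nonneg (le_max_left 0 _)
    have hqle : max 0 ((p : Int) - 50) ≤ (p : Int) := max_le (by omega) (by omega)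
    have hqp : q ≤ p := by omega
    set cnt : Nat := p - q with hcnt
    rw [← hq0]
    have hA := pvScanA_desc l q cnt (by omega)
    rw [show q + cnt = p from by omega] at hA
    have hlo : ((q : Nat) : Int) + 1 = ((q + 1 : Nat) : Int) := by push_cast; ring
    have hp1 : ((p : Nat) : Int) + 1 = ((p + 1 : Nat) : Int) := by push_cast; ring
    have hsp : (" ").toList = [' '] := rfl
    have hnl : ("\n").toList = ['\n'] := rfl
    have htb : ("\t").toList = ['\t'] := rfl
    have hrwB : ∀ s : String, PySem.Str.rfindFrom text s (((q:Nat):Int) + 1) (some (((p:Nat):Int) + 1))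
          = PySem.Chars.rfindFrom l s.toList ((q+1 : Nat) : Int) (some ((p+1 : Nat) : Int)) :=
      fun s => by rw [PySem.Str.rfindFrom_eq, hlo, hp1]
    rw [hrwB " ", hrwB "\n", hrwB "\t", hsp, hnl, htb]
    have hB1 := pvRfindFrom_spec l ' ' (q+1) (p+1) (by omega) (by omega)
    have hB2 := pvRfindFrom_spec l '\n' (q+1) (p+1) (by omega) (by omega)
    have hB3 := pvRfindFrom_spec l '\t' (q+1) (p+1) (by omega) (by omega)
    have hMax := pvMaxCombine l (q+1) (p+1) _ _ _ hB1 hB2 hB3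
    rcases hMax with ⟨hM, hNo⟩ | ⟨k, hGW, hM⟩
    · -- no whitespace behind: both fall through to the forward search
      rw [if_neg (by rw [hM]; simp)]
      rcases hA with ⟨hsA, _⟩ | ⟨k, hGWA, _⟩
      swap
      · exact absurd hNo (by intro h; exact pvGW_not_noWs (by simpa using hGWA) h)
      rw [hsA]
      -- forward window [p, en)
      set en : Nat := (min (l.length : Int) ((p : Int) + 50)).toNat with hendef
      have hen0 : ((en : Nat) : Int) = min (l.length : Int) ((p : Int) + 50) :=
        Int.toNat_of_nonneg (le_min (by omega) (by omega))
      have henl : (min (l.length : Int) ((p : Int) + 50)) ≤ (l.length : Int) := min_le_left _ _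
      have henp : (p : Int) < min (l.length : Int) ((p : Int) + 50) := lt_min (by omega) (by omega)
      have hpen : p ≤ en := by omega
      have henle : en ≤ l.length := by omega
      set cnt2 : Nat := en - p with hcnt2
      rw [← hen0]
      have hA2 := pvScanA_asc l cnt2 p (by omega)
      rw [show p + cnt2 = en from by omega] at hA2
      have hrwF : ∀ s : String, PySem.Str.findFrom text s ((p : Nat) : Int) (some ((en : Nat) : Int))
            = PySem.Chars.findFrom l s.toList ((p : Nat) : Int) (some ((en : Nat) : Int)) :=
        fun s => by rw [PySem.Str.findFrom_eq]
      rw [hrwF " ", hrwF "\n", hrwF "\t", hsp, hnl, htb]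
      have hC1 := pvFindFrom_spec l ' ' p en henle hpen
      have hC2 := pvFindFrom_spec l '\n' p en henle hpen
      have hC3 := pvFindFrom_spec l '\t' p en henle hpen
      have hMin := pvMinCombine l p en _ _ _ hC1 hC2 hC3
      rcases hMin with ⟨hm, hNo2⟩ | ⟨k2, hLW, hm⟩
      · rcases hA2 with ⟨hsA2, _⟩ | ⟨k2, hLWA, _⟩
        · rw [hsA2, hm]
        · exact absurd hNo2 (fun h => pvLW_not_noWs hLWA h)
      · rcases hA2 with ⟨_, hNoA2⟩ | ⟨k2', hLWA, hsA2⟩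
        · exact absurd hNoA2 (fun h => pvLW_not_noWs hLW h)
        · rw [hsA2, hm, pvLW_unique hLWA hLW]
    · -- whitespace found behind: A's scan hits the same greatest index
      rcases hA with ⟨_, hNoA⟩ | ⟨k', hGWA, hsA⟩
      · exact absurd hNoA (fun h => pvGW_not_noWs hGW h)
      · rw [hsA, if_pos (by rw [hM]; omega), hM, pvGW_unique hGWA hGW]
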